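-- pv_equiv track=rewrite | github.com/ckoons/BubbleSpacetimeTheory | play/toy_308_a12_cascade_wall.py | _dim_B
-- ===== SOURCE A (Python) =====
-- def _dim_B(p, q, r):
--     """Dimension of SO(2r+1) rep with highest weight (p, q, 0, ..., 0)."""
--     lam = [0] * (r + 1)
--     lam[1] = p; lam[2] = q
--     L = [0] * (r + 1); P = [0] * (r + 1)
--     for i in range(1, r + 1):
--         P[i] = 2 * r - 2 * i + 1
--         L[i] = 2 * lam[i] + P[i]
--     num = den = 1
--     for i in range(1, r + 1):
--         for j in range(i + 1, r + 1):
--             num *= (L[i]**2 - L[j]**2)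
--             den *= (P[i]**2 - P[j]**2)
--     for i in range(1, r + 1):
--         num *= L[i]; den *= P[i]
--     return num // den
-- ===== SOURCE B (Python) =====
-- def _dim_B(p, q, r):
--     """Dimension of SO(2r+1) rep with highest weight (p, q, 0, ..., 0).
--
--     O(r): only the factors involving rows 1 and 2 survive; for i >= 3 the
--     shifted weight L[i] equals the Weyl-vector entry P[i] = 2r-2i+1, so every
--     factor of a pair with both indices >= 3 cancels between numerator and
--     denominator."""
--     P1 = 2 * r - 1
--     P2 = 2 * r - 3
--     L1 = 2 * p + P1
--     L2 = 2 * q + P2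
--     num = (L1 * L1 - L2 * L2) * L1 * L2
--     den = (P1 * P1 - P2 * P2) * P1 * P2
--     for j in range(3, r + 1):
--         Pj2 = (2 * r - 2 * j + 1) ** 2
--         num *= (L1 * L1 - Pj2) * (L2 * L2 - Pj2)
--         den *= (P1 * P1 - Pj2) * (P2 * P2 - Pj2)
--     return num // den
-- ===== Notes on version B (the rewrite author's own statement) =====
-- stated objective: faster
-- what changed: Instead of building the lam/L/P arrays and multiplying all O(r^2) pairs (i,j), B multiplies only the factors involving rows 1 and 2 (the only rows where the weight is nonzero, so L[i]=P[i] for i>=3 and every pair with both indices >=3 cancels between numerator and denominator), a single O(r) loop with no arrays.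
import Mathlib
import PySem

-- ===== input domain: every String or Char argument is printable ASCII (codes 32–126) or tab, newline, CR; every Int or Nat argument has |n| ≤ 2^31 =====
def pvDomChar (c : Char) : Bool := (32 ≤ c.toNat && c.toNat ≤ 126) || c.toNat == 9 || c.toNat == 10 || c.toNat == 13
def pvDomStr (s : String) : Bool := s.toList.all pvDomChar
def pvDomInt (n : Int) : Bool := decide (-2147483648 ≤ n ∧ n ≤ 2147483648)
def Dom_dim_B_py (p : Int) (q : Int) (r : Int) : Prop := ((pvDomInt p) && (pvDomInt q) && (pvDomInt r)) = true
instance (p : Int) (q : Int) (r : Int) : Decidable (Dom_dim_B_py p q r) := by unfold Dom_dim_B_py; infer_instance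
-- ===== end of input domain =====

-- B replaces A's O(r^2) double product over all index pairs by an O(r) product over the
-- factors involving rows 1 and 2 only (pairs with both indices >= 3 cancel since L[i] = P[i] there).


-- ===== PORT A =====
def dim_B_py (p : Int) (q : Int) (r : Int) : Int :=
  -- lam = [0]*(r+1); lam[1] = p; lam[2] = q
  let lam : List Int :=
    PySem.List.pySetD (PySem.List.pySetD (List.replicate (r + 1).toNat (0 : Int)) 1 p) 2 q
  -- L = [0]*(r+1); P = [0]*(r+1); for i in range(1, r+1): P[i] = 2r-2i+1; L[i] = 2*lam[i] + P[i]
  let LP : List Int × List Int :=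
    (PySem.List.pyRange 1 (r + 1) 1).foldl
      (fun (s : List Int × List Int) i =>
        let P' := PySem.List.pySetD s.2 i (2 * r - 2 * i + 1)
        (PySem.List.pySetD s.1 i (2 * PySem.List.pyGetD lam i 0 + PySem.List.pyGetD P' i 0), P'))
      (List.replicate (r + 1).toNat (0 : Int), List.replicate (r + 1).toNat (0 : Int))
  -- num = den = 1; for i in range(1,r+1): for j in range(i+1,r+1): num *= L[i]**2-L[j]**2; den *= P[i]**2-P[j]**2
  let nd : Int × Int :=
    (PySem.List.pyRange 1 (r + 1) 1).foldl
      (fun (s : Int × Int) i =>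
        (PySem.List.pyRange (i + 1) (r + 1) 1).foldl
          (fun (t : Int × Int) j =>
            (t.1 * ((PySem.List.pyGetD LP.1 i 0) ^ 2 - (PySem.List.pyGetD LP.1 j 0) ^ 2),
             t.2 * ((PySem.List.pyGetD LP.2 i 0) ^ 2 - (PySem.List.pyGetD LP.2 j 0) ^ 2))) s)
      (1, 1)
  -- for i in range(1, r+1): num *= L[i]; den *= P[i]
  let nd2 : Int × Int :=
    (PySem.List.pyRange 1 (r + 1) 1).foldl
      (fun (s : Int × Int) i =>
        (s.1 * PySem.List.pyGetD LP.1 i 0, s.2 * PySem.List.pyGetD LP.2 i 0)) nd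
  -- return num // den
  PySem.Int.floordiv nd2.1 nd2.2

-- ===== PORT B =====
def dim_B_py_alt (p : Int) (q : Int) (r : Int) : Int :=
  let P1 := 2 * r - 1
  let P2 := 2 * r - 3
  let L1 := 2 * p + P1
  let L2 := 2 * q + P2
  let nd : Int × Int :=
    (PySem.List.pyRange 3 (r + 1) 1).foldl
      (fun (s : Int × Int) j =>
        let Pj2 := (2 * r - 2 * j + 1) ^ 2
        (s.1 * ((L1 * L1 - Pj2) * (L2 * L2 - Pj2)),
         s.2 * ((P1 * P1 - Pj2) * (P2 * P2 - Pj2))))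
      ((L1 * L1 - L2 * L2) * L1 * L2, (P1 * P1 - P2 * P2) * P1 * P2)
  PySem.Int.floordiv nd.1 nd.2

-- ===== PRECONDITION & SPEC =====
-- Pre_ excludes exactly r ≤ 1, where A raises IndexError on 'lam[1] = p' or 'lam[2] = q'.
def Pre_dim_B_py (p : Int) (q : Int) (r : Int) : Prop := 2 ≤ r
instance (p : Int) (q : Int) (r : Int) : Decidable (Pre_dim_B_py p q r) := by
  unfold Pre_dim_B_py; infer_instance

def pvWitness_dim_B_py : Int × Int × Int := (1, 1, 3)

def Spec_dim_B_py (p : Int) (q : Int) (r : Int) (out : Int) : Prop := out = dim_B_py_alt p q r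
instance (p : Int) (q : Int) (r : Int) (out : Int) : Decidable (Spec_dim_B_py p q r out) := by
  unfold Spec_dim_B_py; infer_instance

-- ===== CLAIM (what is proved, stated in full; the proofs are below) =====
def Claim_equal_dim_B_py : Prop :=
  ∀ (p : Int) (q : Int) (r : Int), Dom_dim_B_py p q r → Pre_dim_B_py p q r →
    Spec_dim_B_py p q r (dim_B_py p q r)

-- ===== LEMMAS AND PROOFS =====

-- the entries of P (resp. L) that A's first loop writes, as closed functions of the index
def pvPv (r i : Int) : Int := 2 * r - 2 * i + 1
def pvLv (p q r i : Int) : Int :=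
  if i = 2 then 2 * q + pvPv r i else if i = 1 then 2 * p + pvPv r i else pvPv r i

lemma pyGetD_pySetD_int (xs : List Int) (i m v : Int) (hi0 : 0 ≤ i) (_hi : i < (xs.length : Int))
    (hm0 : 0 ≤ m) (hm : m < (xs.length : Int)) :
    PySem.List.pyGetD (PySem.List.pySetD xs i v) m 0 =
      if m = i then v else PySem.List.pyGetD xs m 0 := by
  rw [PySem.List.pySetD_of_nonneg xs v hi0,
      PySem.List.pyGetD_eq_getElem _ _ hm0 (by simpa using hm),
      List.getElem_set]
  by_cases h : m = i
  · simp [h]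
  · have hne : ¬ (i.toNat = m.toNat) := by omega
    rw [if_neg hne, if_neg h, PySem.List.pyGetD_eq_getElem xs _ hm0 hm]

lemma length_foldl_pySetD (f : Int → Int) (l : List Int) (xs : List Int) :
    (l.foldl (fun ys i => PySem.List.pySetD ys i (f i)) xs).length = xs.length := by
  induction l generalizing xs with
  | nil => rfl
  | cons a l ih => simp [List.foldl_cons, ih, PySem.List.length_pySetD]

lemma getD_foldl_pySetD (f : Int → Int) (a b m : Int) (xs : List Int)
    (ha : 0 ≤ a) (hb : b ≤ (xs.length : Int)) (hm0 : 0 ≤ m) (hm : m < (xs.length : Int)) :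
    PySem.List.pyGetD ((PySem.List.pyRange a b 1).foldl
        (fun ys i => PySem.List.pySetD ys i (f i)) xs) m 0 =
      if a ≤ m ∧ m < b then f m else PySem.List.pyGetD xs m 0 := by
  by_cases hab : b ≤ a
  · rw [PySem.List.pyRange_one_eq_nil hab]
    have : ¬ (a ≤ m ∧ m < b) := by omega
    simp [this]
  · rw [not_le] at hab
    generalize hn : (b - a).toNat = n
    induction n generalizing b with
    | zero => omega
    | succ n ih =>
      have hab1 : a ≤ b - 1 := by omega
      have hsplit : PySem.List.pyRange a b 1 = PySem.List.pyRange a (b - 1) 1 ++ [b - 1] := by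
        have := PySem.List.pyRange_one_succ_right hab1 (a := a) (b := b - 1)
        simpa using this
      rw [hsplit, List.foldl_append, List.foldl_cons, List.foldl_nil]
      have hlen : ((PySem.List.pyRange a (b - 1) 1).foldl
          (fun ys i => PySem.List.pySetD ys i (f i)) xs).length = xs.length :=
        length_foldl_pySetD f _ xs
      rw [pyGetD_pySetD_int _ _ _ _ (by omega) (by rw [hlen]; omega) hm0 (by rw [hlen]; omega)]
      by_cases hmb : m = b - 1
      · have hc : a ≤ m ∧ m < b := by omega
        rw [if_pos hmb, if_pos hc, hmb]
      · rw [if_neg hmb]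
        by_cases hab2 : b - 1 ≤ a
        · rw [PySem.List.pyRange_one_eq_nil hab2, List.foldl_nil]
          have h1 : ¬ (a ≤ m ∧ m < b - 1) := by omega
          have h2 : (a ≤ m ∧ m < b) ↔ (a ≤ m ∧ m < b - 1) := by omega
          simp [h1, h2]
        · rw [ih (b - 1) (by omega) (by omega) (by omega)]
          have h2 : (a ≤ m ∧ m < b) ↔ (a ≤ m ∧ m < b - 1) := by omega
          simp [h2]

lemma loop1_eq (lam : List Int) (r : Int) (l : List Int) (L P : List Int)
    (hl : ∀ i ∈ l, 0 ≤ i ∧ i < (P.length : Int)) :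
    l.foldl (fun (s : List Int × List Int) i =>
        let P' := PySem.List.pySetD s.2 i (2 * r - 2 * i + 1)
        (PySem.List.pySetD s.1 i (2 * PySem.List.pyGetD lam i 0 + PySem.List.pyGetD P' i 0), P'))
      (L, P) =
    (l.foldl (fun ys i => PySem.List.pySetD ys i (2 * PySem.List.pyGetD lam i 0 + (2 * r - 2 * i + 1))) L,
     l.foldl (fun ys i => PySem.List.pySetD ys i (2 * r - 2 * i + 1)) P) := by
  induction l generalizing L P with
  | nil => rfl
  | cons a l ih =>
    have ha := hl a (List.mem_cons_self)
    have hget : PySem.List.pyGetD (PySem.List.pySetD P a (2 * r - 2 * a + 1)) a 0 =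
        2 * r - 2 * a + 1 := by
      rw [pyGetD_pySetD_int P a a _ ha.1 ha.2 ha.1 ha.2, if_pos rfl]
    simp only [List.foldl_cons]
    rw [show (let P' := PySem.List.pySetD P a (2 * r - 2 * a + 1)
        (PySem.List.pySetD L a (2 * PySem.List.pyGetD lam a 0 + PySem.List.pyGetD P' a 0), P')) =
        (PySem.List.pySetD L a (2 * PySem.List.pyGetD lam a 0 + (2 * r - 2 * a + 1)),
         PySem.List.pySetD P a (2 * r - 2 * a + 1)) by rw [show (let P' := PySem.List.pySetD P a (2 * r - 2 * a + 1)
        (PySem.List.pySetD L a (2 * PySem.List.pyGetD lam a 0 + PySem.List.pyGetD P' a 0), P')) =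
        (PySem.List.pySetD L a (2 * PySem.List.pyGetD lam a 0 + PySem.List.pyGetD (PySem.List.pySetD P a (2 * r - 2 * a + 1)) a 0), PySem.List.pySetD P a (2 * r - 2 * a + 1)) from rfl, hget]]
    exact ih _ _ (fun i hi => by
      have := hl i (List.mem_cons_of_mem _ hi)
      simpa [PySem.List.length_pySetD] using this)

lemma foldl_mul_eq_prod (f : Int → Int) (l : List Int) (c : Int) :
    l.foldl (fun a x => a * f x) c = c * (l.map f).prod := by
  induction l generalizing c with
  | nil => simp
  | cons a l ih => simp [List.foldl_cons, ih, mul_assoc]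

lemma pvLv_ge3 (p q r i : Int) (hi : 3 ≤ i) : pvLv p q r i = pvPv r i := by
  unfold pvLv; rw [if_neg (by omega), if_neg (by omega)]

lemma floordiv_scale (k : Int) (hk : 0 < k) (n d : Int) :
    PySem.Int.floordiv (n * k) (d * k) = PySem.Int.floordiv n d := by
  unfold PySem.Int.floordiv
  rw [mul_comm n k, mul_comm d k, Int.mul_fdiv_mul_of_pos _ _ hk]

lemma pyGetD_lam (p q r m : Int) (hr : 2 ≤ r) (hm0 : 0 ≤ m) (hm : m < r + 1) :
    PySem.List.pyGetD
      (PySem.List.pySetD (PySem.List.pySetD (List.replicate (r + 1).toNat (0 : Int)) 1 p) 2 q) m 0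
      = if m = 2 then q else if m = 1 then p else 0 := by
  have hlen : ((List.replicate (r + 1).toNat (0 : Int)).length : Int) = r + 1 := by
    simp; omega
  rw [pyGetD_pySetD_int _ 2 m q (by omega)
        (by rw [PySem.List.length_pySetD, hlen]; omega) hm0
        (by rw [PySem.List.length_pySetD, hlen]; omega)]
  by_cases h2 : m = 2
  · rw [if_pos h2, if_pos h2]
  · rw [if_neg h2, if_neg h2,
        pyGetD_pySetD_int _ 1 m p (by omega) (by rw [hlen]; omega) hm0 (by rw [hlen]; omega)]
    by_cases h1 : m = 1
    · rw [if_pos h1, if_pos h1]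
    · rw [if_neg h1, if_neg h1,
          PySem.List.pyGetD_eq_getElem _ _ hm0 (by rw [hlen]; omega), List.getElem_replicate]

lemma main_eq (p q r : Int) (hr : 2 ≤ r) : dim_B_py p q r = dim_B_py_alt p q r := by
  have hlenR : ((List.replicate (r + 1).toNat (0 : Int)).length : Int) = r + 1 := by
    simp; omega
  simp only [dim_B_py, dim_B_py_alt]
  rw [loop1_eq _ r _ _ _ (by
    intro i hi; rw [PySem.List.mem_pyRange_one] at hi
    exact ⟨by omega, by rw [hlenR]; omega⟩)]
  dsimp only
  -- name the two written arrays (so later rewrites are unambiguous)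
  generalize hLf : (PySem.List.pyRange 1 (r + 1) 1).foldl
      (fun ys i => PySem.List.pySetD ys i
        (2 * PySem.List.pyGetD
          (PySem.List.pySetD (PySem.List.pySetD (List.replicate (r + 1).toNat (0 : Int)) 1 p) 2 q)
          i 0 + (2 * r - 2 * i + 1)))
      (List.replicate (r + 1).toNat (0 : Int)) = Lf
  generalize hPf : (PySem.List.pyRange 1 (r + 1) 1).foldl
      (fun ys i => PySem.List.pySetD ys i (2 * r - 2 * i + 1))
      (List.replicate (r + 1).toNat (0 : Int)) = Pf
  -- closed forms for the entries of L and P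
  have hL : ∀ m : Int, 1 ≤ m → m ≤ r → PySem.List.pyGetD Lf m 0 = pvLv p q r m := by
    intro m h1 h2
    rw [← hLf,
        getD_foldl_pySetD _ 1 (r + 1) m _ (by omega) (by rw [hlenR] : r + 1 ≤ ((List.replicate (r + 1).toNat (0 : Int)).length : Int)) (by omega) (by rw [hlenR]; omega),
        if_pos ⟨h1, by omega⟩, pyGetD_lam p q r m hr (by omega) (by omega)]
    unfold pvLv pvPv
    split_ifs <;> ring
  have hP : ∀ m : Int, 1 ≤ m → m ≤ r → PySem.List.pyGetD Pf m 0 = pvPv r m := by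
    intro m h1 h2
    rw [← hPf,
        getD_foldl_pySetD _ 1 (r + 1) m _ (by omega) (by rw [hlenR] : r + 1 ≤ ((List.replicate (r + 1).toNat (0 : Int)).length : Int)) (by omega) (by rw [hlenR]; omega),
        if_pos ⟨h1, by omega⟩]
    rfl
  -- third loop: entries become closed factors
  rw [PySem.List.foldl_congr_mem _
    (fun (s : Int × Int) i => (s.1 * PySem.List.pyGetD Lf i 0, s.2 * PySem.List.pyGetD Pf i 0))
    (fun (s : Int × Int) i => (s.1 * pvLv p q r i, s.2 * pvPv r i)) _ (by
      intro acc i hi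
      rw [PySem.List.mem_pyRange_one] at hi
      dsimp only
      rw [hL i hi.1 (by omega), hP i hi.1 (by omega)])]
  -- second loop: nested folds become products of closed factors
  rw [PySem.List.foldl_congr_mem _
    (fun (s : Int × Int) i =>
      (PySem.List.pyRange (i + 1) (r + 1) 1).foldl
        (fun (t : Int × Int) j =>
          (t.1 * (PySem.List.pyGetD Lf i 0 ^ 2 - PySem.List.pyGetD Lf j 0 ^ 2),
           t.2 * (PySem.List.pyGetD Pf i 0 ^ 2 - PySem.List.pyGetD Pf j 0 ^ 2))) s)
    (fun (s : Int × Int) i =>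
      (s.1 * ((PySem.List.pyRange (i + 1) (r + 1) 1).map
          (fun j => pvLv p q r i ^ 2 - pvLv p q r j ^ 2)).prod,
       s.2 * ((PySem.List.pyRange (i + 1) (r + 1) 1).map
          (fun j => pvPv r i ^ 2 - pvPv r j ^ 2)).prod))
    _ (by
      intro acc i hi
      rw [PySem.List.mem_pyRange_one] at hi
      obtain ⟨a, b⟩ := acc
      dsimp only
      rw [PySem.List.foldl_congr_mem _ _
        (fun (t : Int × Int) j =>
          (t.1 * (pvLv p q r i ^ 2 - pvLv p q r j ^ 2),
           t.2 * (pvPv r i ^ 2 - pvPv r j ^ 2))) _ (by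
        intro t j hj
        rw [PySem.List.mem_pyRange_one] at hj
        dsimp only
        rw [hL i hi.1 (by omega), hL j (by omega) (by omega),
            hP i hi.1 (by omega), hP j (by omega) (by omega)]),
        PySem.List.foldl_prod_mk
          (fun (c : Int) j => c * (pvLv p q r i ^ 2 - pvLv p q r j ^ 2))
          (fun (c : Int) j => c * (pvPv r i ^ 2 - pvPv r j ^ 2)),
        foldl_mul_eq_prod (fun j => pvLv p q r i ^ 2 - pvLv p q r j ^ 2),
        foldl_mul_eq_prod (fun j => pvPv r i ^ 2 - pvPv r j ^ 2)])]
  rw [PySem.List.foldl_prod_mk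
        (fun (c : Int) i => c * ((PySem.List.pyRange (i + 1) (r + 1) 1).map
          (fun j => pvLv p q r i ^ 2 - pvLv p q r j ^ 2)).prod)
        (fun (c : Int) i => c * ((PySem.List.pyRange (i + 1) (r + 1) 1).map
          (fun j => pvPv r i ^ 2 - pvPv r j ^ 2)).prod),
      foldl_mul_eq_prod (fun i => ((PySem.List.pyRange (i + 1) (r + 1) 1).map
          (fun j => pvLv p q r i ^ 2 - pvLv p q r j ^ 2)).prod),
      foldl_mul_eq_prod (fun i => ((PySem.List.pyRange (i + 1) (r + 1) 1).map
          (fun j => pvPv r i ^ 2 - pvPv r j ^ 2)).prod)]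
  rw [PySem.List.foldl_prod_mk
        (fun (c : Int) i => c * pvLv p q r i) (fun (c : Int) i => c * pvPv r i),
      foldl_mul_eq_prod (fun i => pvLv p q r i), foldl_mul_eq_prod (fun i => pvPv r i)]
  dsimp only
  -- B's loop as a product
  rw [PySem.List.foldl_prod_mk
        (fun (c : Int) j => c * (((2 * p + (2 * r - 1)) * (2 * p + (2 * r - 1)) - (2 * r - 2 * j + 1) ^ 2) *
          ((2 * q + (2 * r - 3)) * (2 * q + (2 * r - 3)) - (2 * r - 2 * j + 1) ^ 2)))
        (fun (c : Int) j => c * (((2 * r - 1) * (2 * r - 1) - (2 * r - 2 * j + 1) ^ 2) *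
          ((2 * r - 3) * (2 * r - 3) - (2 * r - 2 * j + 1) ^ 2))),
      foldl_mul_eq_prod (fun j => ((2 * p + (2 * r - 1)) * (2 * p + (2 * r - 1)) - (2 * r - 2 * j + 1) ^ 2) *
          ((2 * q + (2 * r - 3)) * (2 * q + (2 * r - 3)) - (2 * r - 2 * j + 1) ^ 2)),
      foldl_mul_eq_prod (fun j => ((2 * r - 1) * (2 * r - 1) - (2 * r - 2 * j + 1) ^ 2) *
          ((2 * r - 3) * (2 * r - 3) - (2 * r - 2 * j + 1) ^ 2))]
  dsimp only
  -- split the ranges: range(1, r+1) = 1 :: 2 :: range(3, r+1)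
  have hR : PySem.List.pyRange 1 (r + 1) 1 = 1 :: 2 :: PySem.List.pyRange 3 (r + 1) 1 := by
    rw [PySem.List.pyRange_one_cons (by omega : (1 : Int) < r + 1),
        show (1 : Int) + 1 = 2 from rfl,
        PySem.List.pyRange_one_cons (by omega : (2 : Int) < r + 1),
        show (2 : Int) + 1 = 3 from rfl]
  rw [hR]
  simp only [List.map_cons, List.prod_cons]
  rw [show (1 : Int) + 1 = 2 from rfl, show (2 : Int) + 1 = 3 from rfl]
  have hR2 : PySem.List.pyRange 2 (r + 1) 1 = 2 :: PySem.List.pyRange 3 (r + 1) 1 := by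
    rw [PySem.List.pyRange_one_cons (by omega : (2 : Int) < r + 1),
        show (2 : Int) + 1 = 3 from rfl]
  rw [hR2]
  simp only [List.map_cons, List.prod_cons]
  -- rewrite every factor over range(3, r+1) to the canonical pvPv form
  have congr3 : ∀ F G : Int → Int, (∀ j, 3 ≤ j → j ≤ r → F j = G j) →
      ((PySem.List.pyRange 3 (r + 1) 1).map F).prod =
      ((PySem.List.pyRange 3 (r + 1) 1).map G).prod := by
    intro F G h
    refine congrArg List.prod (List.map_congr_left ?_)
    intro j hj
    rw [PySem.List.mem_pyRange_one] at hj
    exact h j hj.1 (by omega)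
  rw [congr3 (fun j => pvLv p q r 1 ^ 2 - pvLv p q r j ^ 2)
        (fun j => pvLv p q r 1 ^ 2 - pvPv r j ^ 2)
        (fun j h3 _ => by dsimp only; rw [pvLv_ge3 p q r j h3]),
      congr3 (fun j => pvLv p q r 2 ^ 2 - pvLv p q r j ^ 2)
        (fun j => pvLv p q r 2 ^ 2 - pvPv r j ^ 2)
        (fun j h3 _ => by dsimp only; rw [pvLv_ge3 p q r j h3]),
      congr3 (fun i => ((PySem.List.pyRange (i + 1) (r + 1) 1).map
          (fun j => pvLv p q r i ^ 2 - pvLv p q r j ^ 2)).prod)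
        (fun i => ((PySem.List.pyRange (i + 1) (r + 1) 1).map
          (fun j => pvPv r i ^ 2 - pvPv r j ^ 2)).prod)
        (fun i h3 _ => by
          dsimp only
          rw [pvLv_ge3 p q r i h3]
          refine congrArg List.prod (List.map_congr_left ?_)
          intro j hj
          rw [PySem.List.mem_pyRange_one] at hj
          rw [pvLv_ge3 p q r j (by omega)]),
      congr3 (fun i => pvLv p q r i) (fun i => pvPv r i)
        (fun i h3 _ => pvLv_ge3 p q r i h3)]
  -- B's per-step factors split into the two canonical products
  rw [show (fun j => ((2 * p + (2 * r - 1)) * (2 * p + (2 * r - 1)) - (2 * r - 2 * j + 1) ^ 2) *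
        ((2 * q + (2 * r - 3)) * (2 * q + (2 * r - 3)) - (2 * r - 2 * j + 1) ^ 2)) =
      (fun j => (pvLv p q r 1 ^ 2 - pvPv r j ^ 2) * (pvLv p q r 2 ^ 2 - pvPv r j ^ 2)) from
    funext fun j => by simp only [pvLv, pvPv]; norm_num; ring,
    List.prod_map_mul]
  -- cancel the common factor K (all pairs and rows not involving rows 1 and 2)
  have hK : 0 < ((PySem.List.pyRange 3 (r + 1) 1).map
        (fun i => ((PySem.List.pyRange (i + 1) (r + 1) 1).map
          (fun j => pvPv r i ^ 2 - pvPv r j ^ 2)).prod)).prod *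
      ((PySem.List.pyRange 3 (r + 1) 1).map (fun i => pvPv r i)).prod := by
    apply mul_pos
    · apply List.prod_pos
      intro x hx
      simp only [List.mem_map] at hx
      obtain ⟨i, hi, rfl⟩ := hx
      rw [PySem.List.mem_pyRange_one] at hi
      apply List.prod_pos
      intro y hy
      simp only [List.mem_map] at hy
      obtain ⟨j, hj, rfl⟩ := hy
      rw [PySem.List.mem_pyRange_one] at hj
      have h1 : 0 < pvPv r j := by unfold pvPv; omega
      have h2 : pvPv r j < pvPv r i := by unfold pvPv; omega
      nlinarith
    · apply List.prod_pos
      intro x hx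
      simp only [List.mem_map] at hx
      obtain ⟨i, hi, rfl⟩ := hx
      rw [PySem.List.mem_pyRange_one] at hi
      unfold pvPv; omega
  conv_rhs => rw [← floordiv_scale _ hK]
  congr 1
  · simp only [pvLv, pvPv]; norm_num; ring
  · simp only [pvPv]; norm_num; ring

-- ===== VERDICT (by name: the statement is the Claim_ definition above) =====
theorem dim_B_py_spec : Claim_equal_dim_B_py := by
  intro p q r _ hr
  unfold Spec_dim_B_py
  exact main_eq p q r hr
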